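-- pv_equiv track=rewrite | github.com/rootcodelabs/classifier | dataset-processor/dataset_validator.py | check_label_counts_after_deletion
-- ===== SOURCE A (Python) =====
-- def check_label_counts_after_deletion(aggregated_data, deleted_data_rows, data_class_columns, min_label_value):
--     # Aggregate counts from the existing dataset
--     class_counts = {col: {} for col in data_class_columns}
--     for row in aggregated_data:
--         for col in data_class_columns:
--             value = row.get(col)
--             if value:
--                 class_counts[col][value] = class_counts[col].get(value, 0) + 1
--
--     # Subtract counts from the deleted data
--     for row_id in deleted_data_rows:
--         for row in aggregated_data:
--             if row.get('rowId') == row_id: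
--                 for col in data_class_columns:
--                     value = row.get(col)
--                     if value:
--                         class_counts[col][value] = class_counts[col].get(value, 0) - 1
--
--     # Check the counts against min_label_value
--     for col, counts in class_counts.items():
--         for value, count in counts.items():
--             if count < min_label_value:
--                 return False
--     return True
-- ===== SOURCE B (Python) =====
-- def check_label_counts_after_deletion(aggregated_data, deleted_data_rows, data_class_columns, min_label_value):
--     # Frequency map of deleted row ids, then ONE weighted pass over the data:
--     # each row contributes 1 - (#times its rowId was deleted) to each of its labels.
--     deleted_counts = {}
--     for rid in deleted_data_rows:
--         deleted_counts[rid] = deleted_counts.get(rid, 0) + 1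
--
--     class_counts = {col: {} for col in data_class_columns}
--     for row in aggregated_data:
--         weight = 1 - deleted_counts.get(row.get('rowId'), 0)
--         for col in data_class_columns:
--             value = row.get(col)
--             if value:
--                 counts = class_counts[col]
--                 counts[value] = counts.get(value, 0) + weight
--
--     return all(count >= min_label_value
--                for counts in class_counts.values()
--                for count in counts.values())
-- ===== Notes on version B (the rewrite author's own statement) =====
-- stated objective: faster
-- what changed: Replaces A's separate add phase plus nested deleted-id-by-row subtraction scan with a frequency map of deleted ids and a single weighted pass over the data, checked with all().
import Mathlib
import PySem

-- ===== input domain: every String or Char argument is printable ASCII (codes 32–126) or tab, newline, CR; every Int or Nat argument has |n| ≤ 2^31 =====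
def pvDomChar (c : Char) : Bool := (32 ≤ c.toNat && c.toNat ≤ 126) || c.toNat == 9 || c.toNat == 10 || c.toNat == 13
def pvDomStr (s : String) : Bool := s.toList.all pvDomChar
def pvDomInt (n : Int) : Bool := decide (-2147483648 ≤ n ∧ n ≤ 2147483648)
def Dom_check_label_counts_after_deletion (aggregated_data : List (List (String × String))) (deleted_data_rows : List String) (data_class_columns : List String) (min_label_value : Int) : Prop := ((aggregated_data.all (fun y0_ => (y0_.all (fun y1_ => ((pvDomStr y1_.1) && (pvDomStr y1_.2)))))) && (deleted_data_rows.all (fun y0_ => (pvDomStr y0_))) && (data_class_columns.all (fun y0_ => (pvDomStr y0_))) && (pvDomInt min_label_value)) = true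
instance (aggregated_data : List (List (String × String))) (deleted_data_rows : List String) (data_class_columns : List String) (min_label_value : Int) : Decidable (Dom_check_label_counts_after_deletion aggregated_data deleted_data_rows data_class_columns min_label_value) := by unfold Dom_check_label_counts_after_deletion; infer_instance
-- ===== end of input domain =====

-- ===== PORT A =====
-- B replaces A's nested deleted-id-by-row subtraction scan with a frequency map of
-- deleted ids and one weighted pass over the data (objective: faster).

-- row.get(col): first-match lookup in the association-list row (exact for the dict rows)
def pvRowGet (row : List (String × String)) (k : String) : Option String :=
  List.lookup k row

-- the final check loops of A: 'for col, counts in ...: for value, count in ...: if count < min: return False; return True'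
def pvCheckInner (m : Int) : List (String × Int) → Bool
  | [] => true
  | (_, c) :: t => if c < m then false else pvCheckInner m t

def pvCheckOuter (m : Int) : List (String × PySem.Dict String Int) → Bool
  | [] => true
  | (_, d) :: t => if pvCheckInner m d.items then pvCheckOuter m t else false

def check_label_counts_after_deletion (aggregated_data : List (List (String × String))) (deleted_data_rows : List String) (data_class_columns : List String) (min_label_value : Int) : Bool :=
  -- class_counts = {col: {} for col in data_class_columns}
  let cc0 : PySem.Dict String (PySem.Dict String Int) :=
    data_class_columns.foldl (fun d col => d.insert col PySem.Dict.empty) PySem.Dict.empty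
  -- aggregate counts from the existing dataset
  let cc1 := aggregated_data.foldl (fun cc row =>
    data_class_columns.foldl (fun cc col =>
      match pvRowGet row col with
      | some v => if v = "" then cc
          else cc.modify col PySem.Dict.empty (fun d => d.modify v 0 (· + 1))
      | none => cc) cc) cc0
  -- subtract counts from the deleted data
  let cc2 := deleted_data_rows.foldl (fun cc rid =>
    aggregated_data.foldl (fun cc row =>
      if pvRowGet row "rowId" == some rid then
        data_class_columns.foldl (fun cc col =>
          match pvRowGet row col with
          | some v => if v = "" then cc
              else cc.modify col PySem.Dict.empty (fun d => d.modify v 0 (· + (-1)))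
          | none => cc) cc
      else cc) cc) cc1
  -- check the counts against min_label_value
  pvCheckOuter min_label_value cc2.items

-- ===== PORT B =====
def check_label_counts_after_deletion_alt (aggregated_data : List (List (String × String))) (deleted_data_rows : List String) (data_class_columns : List String) (min_label_value : Int) : Bool :=
  -- frequency map of deleted row ids
  let delc : PySem.Dict String Int :=
    deleted_data_rows.foldl (fun d rid => d.insert rid (d.getD rid 0 + 1)) PySem.Dict.empty
  let cc0 : PySem.Dict String (PySem.Dict String Int) :=
    data_class_columns.foldl (fun d col => d.insert col PySem.Dict.empty) PySem.Dict.empty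
  -- one weighted pass; deleted_counts.get(row.get('rowId'), 0): keys are strings, so a missing rowId (None) finds nothing
  let cc := aggregated_data.foldl (fun cc row =>
    let w : Int := 1 - (match pvRowGet row "rowId" with
                        | some r => delc.getD r 0
                        | none => 0)
    data_class_columns.foldl (fun cc col =>
      match pvRowGet row col with
      | some v => if v = "" then cc
          else cc.modify col PySem.Dict.empty (fun d => d.modify v 0 (· + w))
      | none => cc) cc) cc0
  cc.values.all (fun d => d.values.all (fun c => decide (min_label_value ≤ c)))

-- ===== PRECONDITION & SPEC =====
def Spec_check_label_counts_after_deletion (aggregated_data : List (List (String × String))) (deleted_data_rows : List String) (data_class_columns : List String) (min_label_value : Int) (out : Bool) : Prop := out = check_label_counts_after_deletion_alt aggregated_data deleted_data_rows data_class_columns min_label_value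
instance (aggregated_data : List (List (String × String))) (deleted_data_rows : List String) (data_class_columns : List String) (min_label_value : Int) (out : Bool) : Decidable (Spec_check_label_counts_after_deletion aggregated_data deleted_data_rows data_class_columns min_label_value out) := by unfold Spec_check_label_counts_after_deletion; infer_instance

-- ===== CLAIM (what is proved, stated in full; the proofs are below) =====
def Claim_equal_check_label_counts_after_deletion : Prop := ∀ (aggregated_data : List (List (String × String))) (deleted_data_rows : List String) (data_class_columns : List String) (min_label_value : Int), Dom_check_label_counts_after_deletion aggregated_data deleted_data_rows data_class_columns min_label_value → Spec_check_label_counts_after_deletion aggregated_data deleted_data_rows data_class_columns min_label_value (check_label_counts_after_deletion aggregated_data deleted_data_rows data_class_columns min_label_value)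

-- ===== LEMMAS AND PROOFS =====

-- Both counting loops are folds of additive updates; we flatten them to a single fold of
-- 'pvApply' over a list of (column, value, delta) operations and compare the results
-- keywise: the deltas do not affect which keys are created in which order, and the
-- per-key delta sums agree by a double-counting argument.

def pvApply (cc : PySem.Dict String (PySem.Dict String Int)) (o : String × String × Int) : PySem.Dict String (PySem.Dict String Int) :=
  cc.modify o.1 PySem.Dict.empty (fun d => d.modify o.2.1 0 (· + o.2.2))

def pvInnerApply (d : PySem.Dict String Int) (o : String × String × Int) : PySem.Dict String Int :=
  d.modify o.2.1 0 (· + o.2.2)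

-- the (col, value) update events a single row generates
def pvEvents (cols : List String) (row : List (String × String)) : List (String × String) :=
  cols.filterMap (fun col =>
    match pvRowGet row col with
    | some v => if v = "" then none else some (col, v)
    | none => none)

def pvOps (cols : List String) (rows : List (List (String × String))) (w : List (String × String) → Int) : List (String × String × Int) :=
  rows.flatMap (fun row => (pvEvents cols row).map (fun cv => (cv.1, cv.2, w row)))

def pvWeight (dels : List String) (row : List (String × String)) : Int :=
  match pvRowGet row "rowId" with
  | some r => (dels.count r : Int)
  | none => 0

def pvOps2 (cols : List String) (rows : List (List (String × String))) (dels : List String) : List (String × String × Int) :=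
  dels.flatMap (fun rid =>
    (rows.filter (fun row => pvRowGet row "rowId" == some rid)).flatMap
      (fun row => (pvEvents cols row).map (fun cv => (cv.1, cv.2, (-1 : Int)))))

def pvCC0 (cols : List String) : PySem.Dict String (PySem.Dict String Int) :=
  cols.foldl (fun d col => d.insert col PySem.Dict.empty) PySem.Dict.empty

def pvSum (col v : String) (ops : List (String × String × Int)) : Int :=
  ((ops.filter (fun o => o.2.1 == v && o.1 == col)).map (fun o => o.2.2)).sum

def pvCnt (col v : String) (cols : List String) (row : List (String × String)) : Int :=
  (((pvEvents cols row).filter (fun cv => cv.2 == v && cv.1 == col)).length : Int)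

-- one row's inner loop is the fold of pvApply over its events (at constant delta)
theorem pv_row_fold (cols : List String) (row : List (String × String)) (w : Int)
    (cc : PySem.Dict String (PySem.Dict String Int)) :
    cols.foldl (fun cc col =>
      match pvRowGet row col with
      | some v => if v = "" then cc
          else cc.modify col PySem.Dict.empty (fun d => d.modify v 0 (· + w))
      | none => cc) cc
    = ((pvEvents cols row).map (fun cv => (cv.1, cv.2, w))).foldl pvApply cc := by
  induction cols generalizing cc with
  | nil => rfl
  | cons c cs ih =>
    simp only [List.foldl_cons, pvEvents, List.filterMap_cons]
    cases h : pvRowGet row c with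
    | none => simpa [pvEvents] using ih _
    | some v =>
      by_cases hv : v = ""
      · subst hv
        simpa [pvEvents] using ih _
      · simpa [pvEvents, pvApply, hv] using ih _

theorem pv_A_flat (cols : List String) (rows : List (List (String × String))) (dels : List String) (m : Int) :
    check_label_counts_after_deletion rows dels cols m
    = pvCheckOuter m ((pvOps cols rows (fun _ => 1) ++ pvOps2 cols rows dels).foldl pvApply (pvCC0 cols)).items := by
  unfold check_label_counts_after_deletion
  rw [List.foldl_append]
  simp only [pvOps, pvOps2, pvCC0, List.foldl_flatMap, ← List.foldl_filter, pv_row_fold]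

theorem pv_B_flat (cols : List String) (rows : List (List (String × String))) (dels : List String) (m : Int) :
    check_label_counts_after_deletion_alt rows dels cols m
    = (((pvOps cols rows (fun row => 1 - pvWeight dels row)).foldl pvApply (pvCC0 cols)).values).all
        (fun d => d.values.all (fun c => decide (m ≤ c))) := by
  unfold check_label_counts_after_deletion_alt
  simp only [PySem.Dict.getD_foldl_insert_add_one, PySem.Dict.getD_empty, zero_add]
  simp only [pvOps, pvCC0, pvWeight, List.foldl_flatMap, pv_row_fold]

-- keys of the outer fold (instance of PySem.Dict.keys_foldl_modify_key)
theorem pv_keys_fold (ops : List (String × String × Int)) (cc : PySem.Dict String (PySem.Dict String Int)) :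
    (ops.foldl pvApply cc).keys = PySem.Set.update cc.keys (ops.map (fun o => o.1)) := by
  simpa [pvApply] using
    PySem.Dict.keys_foldl_modify_key ops (fun o => o.1) PySem.Dict.empty
      (fun _ o => fun d => d.modify o.2.1 0 (· + o.2.2)) cc

theorem pv_nodup_fold (ops : List (String × String × Int)) (cc : PySem.Dict String (PySem.Dict String Int))
    (h : cc.keys.Nodup) : (ops.foldl pvApply cc).keys.Nodup := by
  simpa [pvApply] using
    PySem.Dict.nodup_keys_foldl_modify_key ops (fun o => o.1) PySem.Dict.empty
      (fun _ o => fun d => d.modify o.2.1 0 (· + o.2.2)) cc h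

theorem pv_inner_keys (ops : List (String × String × Int)) (d : PySem.Dict String Int) :
    (ops.foldl pvInnerApply d).keys = PySem.Set.update d.keys (ops.map (fun o => o.2.1)) := by
  simpa [pvInnerApply] using
    PySem.Dict.keys_foldl_modify_key ops (fun o => o.2.1) 0 (fun _ o => (· + o.2.2)) d

theorem pv_inner_nodup (ops : List (String × String × Int)) (d : PySem.Dict String Int)
    (h : d.keys.Nodup) : (ops.foldl pvInnerApply d).keys.Nodup := by
  simpa [pvInnerApply] using
    PySem.Dict.nodup_keys_foldl_modify_key ops (fun o => o.2.1) 0 (fun _ o => (· + o.2.2)) d h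

-- projection of the outer fold to one column
theorem pv_proj (ops : List (String × String × Int)) (cc : PySem.Dict String (PySem.Dict String Int)) (col : String) :
    (ops.foldl pvApply cc).getD col PySem.Dict.empty
    = (ops.filter (fun o => o.1 == col)).foldl pvInnerApply (cc.getD col PySem.Dict.empty) := by
  induction ops generalizing cc with
  | nil => rfl
  | cons o t ih =>
    simp only [List.foldl_cons, List.filter_cons]
    by_cases hc : o.1 = col
    · have hb : (o.1 == col) = true := by simp [hc]
      rw [if_pos hb, List.foldl_cons, ih]
      congr 1
      simp [pvApply, pvInnerApply, hc]
    · have hb : (o.1 == col) = false := by simp [hc]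
      rw [if_neg (by simp [hb]), ih]
      congr 1
      simp [pvApply, PySem.Dict.getD_modify, Ne.symm hc]

-- values of the inner fold
theorem pv_inner_getD (ops : List (String × String × Int)) (d : PySem.Dict String Int) (v : String) :
    (ops.foldl pvInnerApply d).getD v 0
    = d.getD v 0 + ((ops.filter (fun o => o.2.1 == v)).map (fun o => o.2.2)).sum := by
  induction ops generalizing d with
  | nil => simp
  | cons o t ih =>
    simp only [List.foldl_cons, List.filter_cons, ih]
    by_cases hv : o.2.1 = v
    · simp [pvInnerApply, hv]
      ring
    · have : (o.2.1 == v) = false := by simp [hv]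
      simp [pvInnerApply, PySem.Dict.getD_modify, this, Ne.symm hv]

-- Set.update by already-present elements is the identity
theorem pv_set_update_id {s : PySem.Set String} {xs : List String} (h : ∀ x ∈ xs, x ∈ s) :
    PySem.Set.update s xs = s := by
  rw [PySem.Set.update_eq_append_filter]
  have hnil : List.filter (fun y => !s.contains y) (PySem.Set.ofList xs) = [] := by
    rw [List.filter_eq_nil_iff]
    intro y hy
    simpa using h y ((PySem.Set.mem_ofList xs y).mp hy)
  rw [hnil, List.append_nil]

theorem pv_cc0_getD (cols : List String) (col : String) :
    (pvCC0 cols).getD col PySem.Dict.empty = PySem.Dict.empty := by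
  have aux : ∀ (cs : List String) (d : PySem.Dict String (PySem.Dict String Int)),
      d.getD col PySem.Dict.empty = PySem.Dict.empty →
      (cs.foldl (fun d c => d.insert c PySem.Dict.empty) d).getD col PySem.Dict.empty = PySem.Dict.empty := by
    intro cs
    induction cs with
    | nil => intro d h; exact h
    | cons c cs ih =>
      intro d h
      refine ih _ ?_
      rw [PySem.Dict.getD_insert]
      split <;> simp [h]
  exact aux cols PySem.Dict.empty (PySem.Dict.getD_empty _ _)

-- sums of deltas over the op lists
theorem pv_sum_append (col v : String) (l1 l2 : List (String × String × Int)) :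
    pvSum col v (l1 ++ l2) = pvSum col v l1 + pvSum col v l2 := by
  simp [pvSum, List.filter_append]

theorem pv_sum_flatMap {α : Type} (col v : String) (l : List α) (f : α → List (String × String × Int)) :
    pvSum col v (l.flatMap f) = (l.map (fun x => pvSum col v (f x))).sum := by
  induction l with
  | nil => simp [pvSum]
  | cons x t ih => simp [List.flatMap_cons, pv_sum_append, ih]

theorem pv_sum_row (col v : String) (evs : List (String × String)) (δ : Int) :
    pvSum col v (evs.map (fun cv => (cv.1, cv.2, δ)))
    = ((evs.filter (fun cv => cv.2 == v && cv.1 == col)).length : Int) * δ := by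
  induction evs with
  | nil => simp [pvSum]
  | cons e t ih =>
    simp only [List.map_cons, pvSum, List.filter_cons] at *
    by_cases h : (e.2 == v && e.1 == col) = true
    · simp only [h, if_true, List.map_cons, List.sum_cons, List.length_cons, ih]
      push_cast
      ring
    · simpa [h] using ih

theorem pv_sum_ops (col v : String) (cols : List String) (rows : List (List (String × String)))
    (w : List (String × String) → Int) :
    pvSum col v (pvOps cols rows w) = (rows.map (fun row => pvCnt col v cols row * w row)).sum := by
  rw [pvOps, pv_sum_flatMap]
  congr 1
  exact List.map_congr_left (fun row _ => pv_sum_row col v (pvEvents cols row) (w row))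

theorem pv_sum_map_neg {α : Type} (l : List α) (f : α → Int) :
    (l.map (fun x => f x * (-1))).sum = -((l.map f).sum) := by
  induction l with
  | nil => simp
  | cons x t ih => simp only [List.map_cons, List.sum_cons, ih]; ring

theorem pv_sum_map_neg' {α : Type} (l : List α) (f : α → Int) :
    (l.map (fun x => -(f x))).sum = -((l.map f).sum) := by
  induction l with
  | nil => simp
  | cons x t ih => simp only [List.map_cons, List.sum_cons, ih]; ring

theorem pv_sum_ops2 (col v : String) (cols : List String) (rows : List (List (String × String)))
    (dels : List String) :
    pvSum col v (pvOps2 cols rows dels)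
    = - (dels.map (fun rid =>
          ((rows.filter (fun row => pvRowGet row "rowId" == some rid)).map
            (fun row => pvCnt col v cols row)).sum)).sum := by
  rw [pvOps2, pv_sum_flatMap]
  have h1 : ∀ rid : String,
      pvSum col v ((rows.filter (fun row => pvRowGet row "rowId" == some rid)).flatMap
        (fun row => (pvEvents cols row).map (fun cv => (cv.1, cv.2, (-1 : Int)))))
      = -(((rows.filter (fun row => pvRowGet row "rowId" == some rid)).map
            (fun row => pvCnt col v cols row)).sum) := by
    intro rid
    rw [pv_sum_flatMap,
      List.map_congr_left (fun row _ => pv_sum_row col v (pvEvents cols row) (-1))]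
    exact pv_sum_map_neg _ _
  rw [List.map_congr_left (fun rid _ => h1 rid)]
  exact pv_sum_map_neg' _ _

-- weight facts
theorem pv_weight_nil (row : List (String × String)) : pvWeight [] row = 0 := by
  unfold pvWeight; cases pvRowGet row "rowId" <;> simp

theorem pv_weight_cons (rid : String) (ds : List String) (row : List (String × String)) :
    pvWeight (rid :: ds) row
    = pvWeight ds row + (if pvRowGet row "rowId" == some rid then 1 else 0) := by
  unfold pvWeight
  cases h : pvRowGet row "rowId" with
  | none => simp
  | some r =>
    push_cast [List.count_cons]
    by_cases hr : r = rid
    · subst hr; simp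
    · simp [hr, Ne.symm hr]

-- sum over a filtered list as a sum of ite
theorem pv_sum_filter {α : Type} (l : List α) (p : α → Bool) (c : α → Int) :
    ((l.filter p).map c).sum = (l.map (fun x => if p x then c x else 0)).sum := by
  induction l with
  | nil => simp
  | cons x t ih =>
    by_cases h : p x = true
    · simp [h, ih]
    · have hf : p x = false := by simpa using h
      simp [hf, ih]

-- the double-counting identity: iterating over deleted ids and matching rows
-- equals weighting each row by how often its id was deleted
theorem pv_double (dels : List String) (rows : List (List (String × String))) (c : List (String × String) → Int) :
    (dels.map (fun rid =>
        ((rows.filter (fun row => pvRowGet row "rowId" == some rid)).map c).sum)).sum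
    = (rows.map (fun row => c row * pvWeight dels row)).sum := by
  induction dels with
  | nil =>
    simp only [List.map_nil, List.sum_nil]
    rw [List.map_congr_left (fun row _ => by rw [pv_weight_nil, mul_zero])]
    simp
  | cons rid t ih =>
    simp only [List.map_cons, List.sum_cons, ih]
    have hcong : rows.map (fun row => c row * pvWeight (rid :: t) row)
        = rows.map (fun row => c row * pvWeight t row
            + (if (pvRowGet row "rowId" == some rid) = true then c row else 0)) := by
      refine List.map_congr_left (fun row _ => ?_)
      rw [pv_weight_cons, mul_add, mul_ite, mul_one, mul_zero]
    rw [hcong, PySem.List.sum_map_add_int, pv_sum_filter]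
    ring

theorem pv_arith (rows : List (List (String × String))) (c w : List (String × String) → Int) :
    (rows.map (fun r => c r * (1 - w r))).sum
    = (rows.map c).sum - (rows.map (fun r => c r * w r)).sum := by
  induction rows with
  | nil => simp
  | cons r t ih => simp only [List.map_cons, List.sum_cons, ih]; ring

-- the per-cell sums of A's two phases and of B's weighted pass agree
theorem pv_sums_eq (col v : String) (cols : List String) (rows : List (List (String × String)))
    (dels : List String) :
    pvSum col v (pvOps cols rows (fun _ => 1) ++ pvOps2 cols rows dels)
    = pvSum col v (pvOps cols rows (fun row => 1 - pvWeight dels row)) := by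
  rw [pv_sum_append, pv_sum_ops, pv_sum_ops2, pv_sum_ops, pv_double, pv_arith]
  rw [List.map_congr_left (fun (row : List (String × String)) (_ : row ∈ rows) => mul_one (pvCnt col v cols row))]
  ring

-- membership facts about the op lists
theorem pv_mem_events (cols : List String) (row : List (String × String)) (cv : String × String)
    (h : cv ∈ pvEvents cols row) : cv.1 ∈ cols ∧ pvRowGet row cv.1 = some cv.2 := by
  simp only [pvEvents, List.mem_filterMap] at h
  obtain ⟨col, hcol, hmatch⟩ := h
  cases hg : pvRowGet row col with
  | none => simp [hg] at hmatch
  | some v =>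
    by_cases hv : v = ""
    · simp [hg, hv] at hmatch
    · simp only [hg, if_neg hv, Option.some.injEq] at hmatch
      subst hmatch
      exact ⟨hcol, hg⟩

theorem pv_mem_ops2 (cols : List String) (rows : List (List (String × String))) (dels : List String)
    (o : String × String × Int) (h : o ∈ pvOps2 cols rows dels) :
    ∃ row ∈ rows, (o.1, o.2.1) ∈ pvEvents cols row := by
  simp only [pvOps2, List.mem_flatMap, List.mem_map, List.mem_filter] at h
  obtain ⟨rid, _, row, ⟨hrow, _⟩, cv, hcv, rfl⟩ := h
  exact ⟨row, hrow, hcv⟩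

-- the key traces (ignoring deltas) of two pvOps lists coincide
theorem pv_ops_fst (cols : List String) (rows : List (List (String × String)))
    (w w' : List (String × String) → Int) :
    (pvOps cols rows w).map (fun o => o.1) = (pvOps cols rows w').map (fun o => o.1) := by
  simp [pvOps, List.map_flatMap, Function.comp_def]

theorem pv_ops_snd_filter (cols : List String) (rows : List (List (String × String)))
    (w w' : List (String × String) → Int) (col : String) :
    ((pvOps cols rows w).filter (fun o => o.1 == col)).map (fun o => o.2.1)
    = ((pvOps cols rows w').filter (fun o => o.1 == col)).map (fun o => o.2.1) := by
  simp only [pvOps]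
  induction rows with
  | nil => simp
  | cons r t ih =>
    simp only [List.flatMap_cons, List.filter_append, List.map_append, ih]
    congr 1
    simp [List.filter_map, List.map_map, Function.comp_def]

theorem pv_cc0_keys (cols : List String) : (pvCC0 cols).keys = PySem.Set.ofList cols := by
  have := PySem.Dict.keys_foldl_insert cols
    (fun _ _ => (PySem.Dict.empty : PySem.Dict String ℤ)) PySem.Dict.empty
  simpa [pvCC0, PySem.Set.update_nil_left] using this

theorem pv_cc0_nodup (cols : List String) : (pvCC0 cols).keys.Nodup := by
  have := PySem.Dict.nodup_keys_foldl_insert cols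
    (fun _ _ => (PySem.Dict.empty : PySem.Dict String ℤ)) PySem.Dict.empty
    PySem.Dict.nodup_keys_empty
  simpa [pvCC0] using this

theorem pv_mem_update_left {s : PySem.Set String} {xs : List String} {x : String} (h : x ∈ s) :
    x ∈ PySem.Set.update s xs := by
  rw [PySem.Set.update_eq_append_filter]
  exact List.mem_append_left _ h

-- each column of A's final dict equals the same column of B's final dict
theorem pv_inner_eq (cols : List String) (rows : List (List (String × String))) (dels : List String)
    (col : String) :
    ((pvOps cols rows (fun _ => 1) ++ pvOps2 cols rows dels).foldl pvApply (pvCC0 cols)).getD col PySem.Dict.empty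
    = ((pvOps cols rows (fun row => 1 - pvWeight dels row)).foldl pvApply (pvCC0 cols)).getD col PySem.Dict.empty := by
  rw [pv_proj, pv_proj, pv_cc0_getD]
  apply PySem.Dict.ext
  have ndA := pv_inner_nodup ((pvOps cols rows (fun _ => 1) ++ pvOps2 cols rows dels).filter
    (fun o => o.1 == col)) PySem.Dict.empty PySem.Dict.nodup_keys_empty
  have ndB := pv_inner_nodup ((pvOps cols rows (fun row => 1 - pvWeight dels row)).filter
    (fun o => o.1 == col)) PySem.Dict.empty PySem.Dict.nodup_keys_empty
  rw [PySem.Dict.items_eq_map_keys _ ndA 0, PySem.Dict.items_eq_map_keys _ ndB 0]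
  have hkeys : (((pvOps cols rows (fun _ => 1) ++ pvOps2 cols rows dels).filter
        (fun o => o.1 == col)).foldl pvInnerApply PySem.Dict.empty).keys
      = (((pvOps cols rows (fun row => 1 - pvWeight dels row)).filter
        (fun o => o.1 == col)).foldl pvInnerApply PySem.Dict.empty).keys := by
    rw [pv_inner_keys, pv_inner_keys, PySem.Dict.keys_empty, List.filter_append,
      List.map_append, PySem.Set.update_append,
      pv_ops_snd_filter cols rows (fun row => 1 - pvWeight dels row) (fun _ => 1) col]
    apply pv_set_update_id
    intro x hx
    obtain ⟨o, ho, rfl⟩ := List.mem_map.mp hx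
    obtain ⟨ho2, hcolb⟩ := List.mem_filter.mp ho
    obtain ⟨row, hrow, hev⟩ := pv_mem_ops2 cols rows dels o ho2
    rw [PySem.Set.update_nil_left, PySem.Set.mem_ofList]
    apply List.mem_map.mpr
    refine ⟨(o.1, o.2.1, 1), ?_, rfl⟩
    apply List.mem_filter.mpr
    refine ⟨?_, hcolb⟩
    simp only [pvOps, List.mem_flatMap, List.mem_map]
    exact ⟨row, hrow, (o.1, o.2.1), hev, rfl⟩
  rw [hkeys]
  refine List.map_congr_left (fun v _ => ?_)
  have hval : (((pvOps cols rows (fun _ => 1) ++ pvOps2 cols rows dels).filter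
        (fun o => o.1 == col)).foldl pvInnerApply PySem.Dict.empty).getD v 0
      = (((pvOps cols rows (fun row => 1 - pvWeight dels row)).filter
        (fun o => o.1 == col)).foldl pvInnerApply PySem.Dict.empty).getD v 0 := by
    rw [pv_inner_getD, pv_inner_getD, List.filter_filter, List.filter_filter]
    have := pv_sums_eq col v cols rows dels
    simpa [pvSum] using this
  rw [hval]

-- A's final dict equals B's final dict
theorem pv_dicts_eq (cols : List String) (rows : List (List (String × String))) (dels : List String) :
    (pvOps cols rows (fun _ => 1) ++ pvOps2 cols rows dels).foldl pvApply (pvCC0 cols)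
    = (pvOps cols rows (fun row => 1 - pvWeight dels row)).foldl pvApply (pvCC0 cols) := by
  apply PySem.Dict.ext
  have ndA := pv_nodup_fold (pvOps cols rows (fun _ => 1) ++ pvOps2 cols rows dels) _ (pv_cc0_nodup cols)
  have ndB := pv_nodup_fold (pvOps cols rows (fun row => 1 - pvWeight dels row)) _ (pv_cc0_nodup cols)
  rw [PySem.Dict.items_eq_map_keys _ ndA PySem.Dict.empty,
    PySem.Dict.items_eq_map_keys _ ndB PySem.Dict.empty]
  have hkeys : ((pvOps cols rows (fun _ => 1) ++ pvOps2 cols rows dels).foldl pvApply (pvCC0 cols)).keys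
      = ((pvOps cols rows (fun row => 1 - pvWeight dels row)).foldl pvApply (pvCC0 cols)).keys := by
    rw [pv_keys_fold, pv_keys_fold, List.map_append, PySem.Set.update_append,
      pv_ops_fst cols rows (fun row => 1 - pvWeight dels row) (fun _ => 1)]
    apply pv_set_update_id
    intro x hx
    obtain ⟨o, ho, rfl⟩ := List.mem_map.mp hx
    obtain ⟨row, _, hev⟩ := pv_mem_ops2 cols rows dels o ho
    apply pv_mem_update_left
    rw [pv_cc0_keys, PySem.Set.mem_ofList]
    exact (pv_mem_events cols row (o.1, o.2.1) hev).1
  rw [hkeys]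
  exact List.map_congr_left (fun k _ => by rw [pv_inner_eq])

-- the final check loop of A is an 'all' over the items
theorem pv_check_inner_all (m : Int) (l : List (String × Int)) :
    pvCheckInner m l = l.all (fun q => decide (m ≤ q.2)) := by
  induction l with
  | nil => rfl
  | cons q t ih =>
    obtain ⟨x, c⟩ := q
    simp only [pvCheckInner, ih, List.all_cons]
    by_cases h : c < m
    · simp [h, not_le.mpr h]
    · simp [h, not_lt.mp h]

theorem pv_check_outer_all (m : Int) (l : List (String × PySem.Dict String Int)) :
    pvCheckOuter m l = l.all (fun p => p.2.items.all (fun q => decide (m ≤ q.2))) := by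
  induction l with
  | nil => rfl
  | cons p t ih =>
    obtain ⟨x, d⟩ := p
    simp only [pvCheckOuter, ih, List.all_cons, pv_check_inner_all]
    by_cases h : d.items.all (fun q => decide (m ≤ q.2)) <;> simp [h]

-- ===== VERDICT (by name: the statement is the Claim_ definition above) =====
theorem check_label_counts_after_deletion_spec : Claim_equal_check_label_counts_after_deletion := by
  intro rows dels cols m _
  unfold Spec_check_label_counts_after_deletion
  rw [pv_A_flat, pv_B_flat, pv_dicts_eq]
  rw [pv_check_outer_all]
  simp only [PySem.Dict.values, List.all_map, Function.comp_def]
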